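-- pv_equiv track=rewrite | github.com/ZixuanZhong/evo | instances/ontology-research/output/poc/extraction-prompts.py | compute_extraction_stats
-- ===== SOURCE A (Python) =====
-- def compute_extraction_stats(result: dict) -> dict:
--     """Compute statistics from extraction results for quality metrics."""
--     stats = {
--         "total_apis": 0,
--         "total_fields": 0,
--         "pii_fields": 0,
--         "financial_fields": 0,
--         "downstream_calls": 0,
--         "db_operations": 0,
--     }
--
--     for api in result.get("apis", []):
--         stats["total_apis"] += 1
--         for schema_key in ["request_schema", "response_schema"]:
--             for field in api.get(schema_key, {}).get("fields", []):
--                 stats["total_fields"] += 1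
--                 if field.get("sensitivity") == "pii":
--                     stats["pii_fields"] += 1
--                 elif field.get("sensitivity") == "financial":
--                     stats["financial_fields"] += 1
--         stats["downstream_calls"] += len(api.get("downstream_calls", []))
--         stats["db_operations"] += len(api.get("db_operations", []))
--
--     return stats
-- ===== SOURCE B (Python) =====
-- def _events(result):
--     """Yield one event label per thing to be counted, in document order."""
--     for api in result.get("apis", []):
--         yield "total_apis"
--         for schema_key in ("request_schema", "response_schema"):
--             for field in api.get(schema_key, {}).get("fields", []):
--                 yield "total_fields"
--                 s = field.get("sensitivity")
--                 if s == "pii":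
--                     yield "pii_fields"
--                 elif s == "financial":
--                     yield "financial_fields"
--         for _ in api.get("downstream_calls", []):
--             yield "downstream_calls"
--         for _ in api.get("db_operations", []):
--             yield "db_operations"
--
--
-- def compute_extraction_stats(result: dict) -> dict:
--     """Compute statistics from extraction results for quality metrics."""
--     tally = {}
--     for event in _events(result):
--         tally[event] = tally.get(event, 0) + 1
--     return {key: tally.get(key, 0) for key in (
--         "total_apis", "total_fields", "pii_fields",
--         "financial_fields", "downstream_calls", "db_operations")}
-- ===== Notes on version B (the rewrite author's own statement) =====
-- stated objective: alternative
-- what changed: Replaced the nested pass that mutates six named counters with an event-stream design: a generator flattens the structure into one stream of event labels (one label per api, per field, per sensitive field, per downstream call / db operation), a single generic tally loop counts the stream into one table, and the six keys are read off the table.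
import Mathlib
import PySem

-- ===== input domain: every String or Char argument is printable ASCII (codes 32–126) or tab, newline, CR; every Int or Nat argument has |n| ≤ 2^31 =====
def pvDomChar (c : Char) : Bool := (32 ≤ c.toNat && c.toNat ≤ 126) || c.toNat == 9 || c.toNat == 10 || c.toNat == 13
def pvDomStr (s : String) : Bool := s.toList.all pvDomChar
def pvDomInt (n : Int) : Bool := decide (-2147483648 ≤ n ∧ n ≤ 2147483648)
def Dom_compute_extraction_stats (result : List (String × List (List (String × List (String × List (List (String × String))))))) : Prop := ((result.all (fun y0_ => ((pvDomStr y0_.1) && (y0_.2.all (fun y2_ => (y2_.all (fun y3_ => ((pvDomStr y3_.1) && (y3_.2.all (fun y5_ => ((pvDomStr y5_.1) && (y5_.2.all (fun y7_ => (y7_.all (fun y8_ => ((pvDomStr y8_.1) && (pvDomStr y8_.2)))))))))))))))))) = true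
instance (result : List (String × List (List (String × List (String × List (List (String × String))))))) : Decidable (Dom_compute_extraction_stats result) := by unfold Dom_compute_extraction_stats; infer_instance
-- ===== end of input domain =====

-- B replaces A's nested pass mutating six named counters with an event-stream design:
-- it flattens the structure into one stream of event labels, tallies that stream in a
-- single generic counter table, and reads the six keys off the table; objective: alternative.
-- Same return value; neither version mutates its argument.

-- ===== PORT A =====
-- helper: body of A's inner 'for field in …' loop (total_fields += 1; if/elif on sensitivity)
def pvA_fieldStep (st : PySem.Dict String Int) (field : List (String × String)) : PySem.Dict String Int :=
  let st := st.insert "total_fields" (st.getD "total_fields" 0 + 1)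
  if (PySem.Dict.mk field).get? "sensitivity" == some "pii" then
    st.insert "pii_fields" (st.getD "pii_fields" 0 + 1)
  else if (PySem.Dict.mk field).get? "sensitivity" == some "financial" then
    st.insert "financial_fields" (st.getD "financial_fields" 0 + 1)
  else st

-- helper: body of A's outer 'for api in …' loop
def pvA_apiStep (st : PySem.Dict String Int)
    (api : List (String × List (String × List (List (String × String))))) : PySem.Dict String Int :=
  let st := st.insert "total_apis" (st.getD "total_apis" 0 + 1)
  let st := ["request_schema", "response_schema"].foldl (fun st schema_key =>
      ((PySem.Dict.mk ((PySem.Dict.mk api).getD schema_key [])).getD "fields" []).foldl pvA_fieldStep st) st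
  let st := st.insert "downstream_calls"
      (st.getD "downstream_calls" 0 + (((PySem.Dict.mk api).getD "downstream_calls" []).length : Int))
  st.insert "db_operations"
      (st.getD "db_operations" 0 + (((PySem.Dict.mk api).getD "db_operations" []).length : Int))

def compute_extraction_stats (result : List (String × List (List (String × List (String × List (List (String × String))))))) : List (String × Int) :=
  let stats : PySem.Dict String Int := PySem.Dict.mk
    [("total_apis", 0), ("total_fields", 0), ("pii_fields", 0),
     ("financial_fields", 0), ("downstream_calls", 0), ("db_operations", 0)]
  (((PySem.Dict.mk result).getD "apis" []).foldl pvA_apiStep stats).items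

-- ===== PORT B =====
-- helper: Source B's generator _events, as the list of labels it yields (one per counted thing)
def pvB_fieldEvents (field : List (String × String)) : List String :=
  "total_fields" ::
    (let s := (PySem.Dict.mk field).get? "sensitivity"
     if s == some "pii" then ["pii_fields"]
     else if s == some "financial" then ["financial_fields"]
     else [])

def pvB_apiEvents (api : List (String × List (String × List (List (String × String))))) : List String :=
  "total_apis" ::
    (["request_schema", "response_schema"].flatMap (fun schema_key =>
        ((PySem.Dict.mk ((PySem.Dict.mk api).getD schema_key [])).getD "fields" []).flatMap pvB_fieldEvents)
     ++ ((PySem.Dict.mk api).getD "downstream_calls" []).map (fun _ => "downstream_calls")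
     ++ ((PySem.Dict.mk api).getD "db_operations" []).map (fun _ => "db_operations"))

def pvB_events (result : List (String × List (List (String × List (String × List (List (String × String))))))) : List String :=
  ((PySem.Dict.mk result).getD "apis" []).flatMap pvB_apiEvents

def compute_extraction_stats_alt (result : List (String × List (List (String × List (String × List (List (String × String))))))) : List (String × Int) :=
  let tally := (pvB_events result).foldl
    (fun d e => d.insert e (d.getD e 0 + 1)) (PySem.Dict.empty : PySem.Dict String Int)
  ["total_apis", "total_fields", "pii_fields",
   "financial_fields", "downstream_calls", "db_operations"].map
    (fun key => (key, tally.getD key 0))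

-- ===== PRECONDITION & SPEC =====
def Spec_compute_extraction_stats (result : List (String × List (List (String × List (String × List (List (String × String))))))) (out : List (String × Int)) : Prop := out = compute_extraction_stats_alt result
-- binder type alias only so the Decidable instance below fits on the allowed shape
abbrev pvResultTy : Type := List (String × List (List (String × List (String × List (List (String × String))))))
instance (result : pvResultTy) (out : List (String × Int)) : Decidable (Spec_compute_extraction_stats result out) := by unfold Spec_compute_extraction_stats; infer_instance

-- ===== CLAIM (what is proved, stated in full; the proofs are below) =====
def Claim_equal_compute_extraction_stats : Prop := ∀ (result : List (String × List (List (String × List (String × List (List (String × String))))))), Dom_compute_extraction_stats result → Spec_compute_extraction_stats result (compute_extraction_stats result)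

-- ===== LEMMAS AND PROOFS =====

-- the six-counter dict with arbitrary values
def pvS6 (a b c d e f : Int) : PySem.Dict String Int := PySem.Dict.mk
  [("total_apis", a), ("total_fields", b), ("pii_fields", c),
   ("financial_fields", d), ("downstream_calls", e), ("db_operations", f)]

-- the sensitivity entries contributed by one api
def pvSens (api : List (String × List (String × List (List (String × String))))) : List (Option String) :=
  ["request_schema", "response_schema"].flatMap (fun schema_key =>
    ((PySem.Dict.mk ((PySem.Dict.mk api).getD schema_key [])).getD "fields" []).map
      (fun field => (PySem.Dict.mk field).get? "sensitivity"))

theorem pvS6_inj (a b c d e f a' b' c' d' e' f' : Int) :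
    pvS6 a b c d e f = pvS6 a' b' c' d' e' f' ↔
      (a = a' ∧ b = b' ∧ c = c' ∧ d = d' ∧ e = e' ∧ f = f') := by
  simp [pvS6, PySem.Dict.mk.injEq]

theorem pvS6_items (a b c d e f : Int) :
    (pvS6 a b c d e f).items
      = [("total_apis", a), ("total_fields", b), ("pii_fields", c),
         ("financial_fields", d), ("downstream_calls", e), ("db_operations", f)] := rfl

theorem pvS6_ins_ta (a b c d e f v : Int) :
    (pvS6 a b c d e f).insert "total_apis" v = pvS6 v b c d e f := rfl
theorem pvS6_ins_dc (a b c d e f v : Int) :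
    (pvS6 a b c d e f).insert "downstream_calls" v = pvS6 a b c d v f := rfl
theorem pvS6_ins_db (a b c d e f v : Int) :
    (pvS6 a b c d e f).insert "db_operations" v = pvS6 a b c d e v := rfl
theorem pvS6_getD_ta (a b c d e f : Int) : (pvS6 a b c d e f).getD "total_apis" 0 = a := rfl
theorem pvS6_getD_dc (a b c d e f : Int) : (pvS6 a b c d e f).getD "downstream_calls" 0 = e := rfl
theorem pvS6_getD_db (a b c d e f : Int) : (pvS6 a b c d e f).getD "db_operations" 0 = f := rfl

theorem pv_fieldStep_eq (a b c d e f : Int) (field : List (String × String)) :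
    pvA_fieldStep (pvS6 a b c d e f) field
      = pvS6 a (b + 1)
          (c + (if (PySem.Dict.mk field).get? "sensitivity" == some "pii" then 1 else 0))
          (d + (if (PySem.Dict.mk field).get? "sensitivity" == some "financial" then 1 else 0))
          e f := by
  unfold pvA_fieldStep
  rcases h : (PySem.Dict.mk field).get? "sensitivity" with _ | s
  · simp [pvS6, PySem.Dict.insert, PySem.Dict.getD, PySem.Dict.get?]
  · by_cases hp : s = "pii"
    · simp [hp, pvS6, PySem.Dict.insert, PySem.Dict.getD, PySem.Dict.get?]
    · by_cases hf : s = "financial"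
      · simp [hf, pvS6, PySem.Dict.insert, PySem.Dict.getD, PySem.Dict.get?]
      · simp [hp, hf, pvS6, PySem.Dict.insert, PySem.Dict.getD, PySem.Dict.get?]

theorem pv_fieldFold (fs : List (List (String × String))) (a b c d e f : Int) :
    fs.foldl pvA_fieldStep (pvS6 a b c d e f)
      = pvS6 a (b + fs.length)
          (c + ((fs.map (fun field => (PySem.Dict.mk field).get? "sensitivity")).count (some "pii") : Int))
          (d + ((fs.map (fun field => (PySem.Dict.mk field).get? "sensitivity")).count (some "financial") : Int))
          e f := by
  induction fs generalizing b c d with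
  | nil => simp
  | cons x xs ih =>
    simp only [List.foldl_cons, pv_fieldStep_eq, ih, List.map_cons, List.count_cons,
      List.length_cons, pvS6_inj]
    refine ⟨trivial, by push_cast; omega, ?_, ?_, trivial, trivial⟩ <;>
      · split_ifs <;> push_cast <;> omega

theorem pv_apiStep_eq (a b c d e f : Int)
    (api : List (String × List (String × List (List (String × String))))) :
    pvA_apiStep (pvS6 a b c d e f) api
      = pvS6 (a + 1) (b + (pvSens api).length)
          (c + ((pvSens api).count (some "pii") : Int))
          (d + ((pvSens api).count (some "financial") : Int))
          (e + (((PySem.Dict.mk api).getD "downstream_calls" []).length : Int))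
          (f + (((PySem.Dict.mk api).getD "db_operations" []).length : Int)) := by
  unfold pvA_apiStep pvSens
  simp only [pvS6_getD_ta, pvS6_ins_ta, List.foldl_cons, List.foldl_nil, pv_fieldFold,
    pvS6_getD_dc, pvS6_ins_dc, pvS6_getD_db, pvS6_ins_db, List.flatMap_cons, List.flatMap_nil,
    List.append_nil, List.length_append, List.count_append, List.length_map, pvS6_inj]
  refine ⟨trivial, by push_cast; omega, by push_cast; omega, by push_cast; omega, trivial, trivial⟩

theorem pv_apiFold (l : List (List (String × List (String × List (List (String × String)))))) (a b c d e f : Int) :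
    l.foldl pvA_apiStep (pvS6 a b c d e f)
      = pvS6 (a + l.length) (b + (l.flatMap pvSens).length)
          (c + ((l.flatMap pvSens).count (some "pii") : Int))
          (d + ((l.flatMap pvSens).count (some "financial") : Int))
          (e + ((l.map (fun api => (((PySem.Dict.mk api).getD "downstream_calls" []).length : Int))).sum))
          (f + ((l.map (fun api => (((PySem.Dict.mk api).getD "db_operations" []).length : Int))).sum)) := by
  induction l generalizing a b c d e f with
  | nil => simp
  | cons x xs ih =>
    simp only [List.foldl_cons, pv_apiStep_eq, ih, List.flatMap_cons, List.map_cons,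
      List.length_append, List.count_append, List.length_cons, List.sum_cons, pvS6_inj]
    refine ⟨by omega, by push_cast; omega, by push_cast; omega, by push_cast; omega,
      by omega, by omega⟩

-- counting helpers for B's event stream
theorem pv_count_flatMap {α β : Type} [BEq β] (l : List α) (g : α → List β) (k : β) :
    (l.flatMap g).count k = (l.map (fun x => (g x).count k)).sum := by
  induction l with
  | nil => simp
  | cons x xs ih => simp [List.flatMap_cons, List.count_append, ih]

theorem pv_count_map_ite {α : Type} (l : List α) (f : α → Option String) (v : Option String) :
    (l.map f).count v = (l.map (fun x => if f x = v then 1 else 0)).sum := by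
  induction l with
  | nil => simp
  | cons x xs ih => by_cases h : f x = v <;> simp [List.count_cons, ih, h, Nat.add_comm]

theorem pv_sum_cast {α : Type} (l : List α) (g : α → Nat) :
    (l.map (fun x => ((g x : Nat) : Int))).sum = (((l.map g).sum : Nat) : Int) := by
  induction l with
  | nil => simp
  | cons x xs ih => simp [ih]

-- per-field event counts (pii and financial are mutually exclusive values of one key)
theorem pv_fe_tf (field : List (String × String)) :
    (pvB_fieldEvents field).count "total_fields" = 1 := by
  unfold pvB_fieldEvents
  rcases h : (PySem.Dict.mk field).get? "sensitivity" with _ | s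
  · simp
  · by_cases hp : s = "pii"
    · simp [hp]
    · by_cases hf : s = "financial"
      · simp [hf]
      · simp [hp, hf]

theorem pv_fe_pii (field : List (String × String)) :
    (pvB_fieldEvents field).count "pii_fields"
      = if (PySem.Dict.mk field).get? "sensitivity" == some "pii" then 1 else 0 := by
  unfold pvB_fieldEvents
  rcases h : (PySem.Dict.mk field).get? "sensitivity" with _ | s
  · simp
  · by_cases hp : s = "pii"
    · simp [hp]
    · by_cases hf : s = "financial"
      · simp [hp, hf]
      · simp [hp, hf]

theorem pv_fe_fin (field : List (String × String)) :
    (pvB_fieldEvents field).count "financial_fields"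
      = if (PySem.Dict.mk field).get? "sensitivity" == some "financial" then 1 else 0 := by
  unfold pvB_fieldEvents
  rcases h : (PySem.Dict.mk field).get? "sensitivity" with _ | s
  · simp
  · by_cases hp : s = "pii"
    · simp [hp]
    · by_cases hf : s = "financial"
      · simp [hf]
      · simp [hp, hf]

theorem pv_fe_other (field : List (String × String)) (k : String)
    (hk : k = "total_apis" ∨ k = "downstream_calls" ∨ k = "db_operations") :
    (pvB_fieldEvents field).count k = 0 := by
  unfold pvB_fieldEvents
  rcases hk with rfl | rfl | rfl <;>
  · rcases h : (PySem.Dict.mk field).get? "sensitivity" with _ | s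
    · simp
    · by_cases hp : s = "pii"
      · simp [hp]
      · by_cases hf : s = "financial"
        · simp [hf]
        · simp [hp, hf]

-- per-api event counts, one per key
theorem pv_ae_ta (api : List (String × List (String × List (List (String × String))))) :
    (pvB_apiEvents api).count "total_apis" = 1 := by
  unfold pvB_apiEvents
  simp [List.count_cons, List.count_append, pv_count_flatMap, pv_fe_other,
    List.count_replicate]

theorem pv_ae_tf (api : List (String × List (String × List (List (String × String))))) :
    (pvB_apiEvents api).count "total_fields" = (pvSens api).length := by
  unfold pvB_apiEvents pvSens
  simp [List.count_cons, List.count_append, pv_count_flatMap, pv_fe_tf,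
    List.count_replicate]

theorem pv_ae_pii (api : List (String × List (String × List (List (String × String))))) :
    (pvB_apiEvents api).count "pii_fields" = (pvSens api).count (some "pii") := by
  unfold pvB_apiEvents pvSens
  simp [List.count_cons, List.count_append, pv_count_flatMap, pv_fe_pii,
    List.count_replicate, pv_count_map_ite]

theorem pv_ae_fin (api : List (String × List (String × List (List (String × String))))) :
    (pvB_apiEvents api).count "financial_fields" = (pvSens api).count (some "financial") := by
  unfold pvB_apiEvents pvSens
  simp [List.count_cons, List.count_append, pv_count_flatMap, pv_fe_fin,
    List.count_replicate, pv_count_map_ite]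

theorem pv_ae_dc (api : List (String × List (String × List (List (String × String))))) :
    (pvB_apiEvents api).count "downstream_calls"
      = ((PySem.Dict.mk api).getD "downstream_calls" []).length := by
  unfold pvB_apiEvents
  simp [List.count_cons, List.count_append, pv_count_flatMap, pv_fe_other,
    List.count_replicate]

theorem pv_ae_db (api : List (String × List (String × List (List (String × String))))) :
    (pvB_apiEvents api).count "db_operations"
      = ((PySem.Dict.mk api).getD "db_operations" []).length := by
  unfold pvB_apiEvents
  simp [List.count_cons, List.count_append, pv_count_flatMap, pv_fe_other,
    List.count_replicate]

-- ===== VERDICT (by name: the statement is the Claim_ definition above) =====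
theorem compute_extraction_stats_spec : Claim_equal_compute_extraction_stats := by
  intro result _
  unfold Spec_compute_extraction_stats compute_extraction_stats compute_extraction_stats_alt
  have hinit : PySem.Dict.mk
      [("total_apis", (0:Int)), ("total_fields", 0), ("pii_fields", 0),
       ("financial_fields", 0), ("downstream_calls", 0), ("db_operations", 0)] = pvS6 0 0 0 0 0 0 := rfl
  dsimp only
  rw [hinit, pv_apiFold, pvS6_items]
  unfold pvB_events
  simp only [PySem.Dict.getD_foldl_insert_add_one, PySem.Dict.getD_empty, List.map_cons,
    List.map_nil, pv_count_flatMap, pv_ae_ta, pv_ae_tf, pv_ae_pii, pv_ae_fin, pv_ae_dc, pv_ae_db]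
  simp [pv_sum_cast, List.length_flatMap, pv_count_flatMap]
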